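-- pv_equiv track=rewrite | github.com/mithil957/algories-py | valid_arrangement_of_pairs.py | valid_arrangement_euler_path
-- ===== SOURCE A (Python) =====
-- from collections import defaultdict
--
-- def valid_arrangement_euler_path(pairs):
--     """
--         Copied from https://leetcode.com/problems/valid-arrangement-of-pairs/discuss/1616288/Python-O(V%2BE)-by-Euler-path-w-Visualization
--         b/c their comments made it very easy to understand
--     """
--     in_degree = defaultdict(int)
--     out_degree = defaultdict(int)
--     adj_matrix = defaultdict(list)
--
--     for src, dst in pairs:
--         in_degree[dst] += 1
--         out_degree[src] += 1
--         adj_matrix[src].append(dst)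
--
--     # Case 1 -> Euler circuit in graph, so any node can be starting value
--     # Euler circuit starts at and ends at the SAME vertex, and uses every edge once
--     start_node_idx = pairs[0][0]
--
--     # Case 2 -> Not a circuit but an Euler path. So, we find
--     # Euler path starts at and ends at a DIFFERENT vertex, and uses every edge once
--     for node in adj_matrix:
--
--         # find node whose out-degree is one more than in-degree
--         if out_degree[node] - in_degree[node] == 1:
--             start_node_idx = node
--             break
--
--     def euler_path(adj_matrix, path, curr_node):
--
--         # DFS until all edges of current node are visited
--         while adj_matrix[curr_node]:
--             # pop one edge and get next visit node
--             next_visit_node = adj_matrix[curr_node].pop()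
--             euler_path(adj_matrix, path, next_visit_node)
--
--             # post-order style
--             # current explorer is finished, record current edge pair
--             path.append([curr_node, next_visit_node])
--
--     record = []
--     euler_path(adj_matrix, record, start_node_idx)
--
--     # reversed of post-order is the euler path
--     return list(reversed(record))
-- ===== SOURCE B (Python) =====
-- def valid_arrangement_euler_path(pairs):
--     # staged passes: adjacency first, then a single net-degree dict (out - in)
--     adj = {}
--     for src, dst in pairs:
--         adj.setdefault(src, []).append(dst)
--
--     net = {}
--     for src, dst in pairs:
--         net[src] = net.get(src, 0) + 1
--         net[dst] = net.get(dst, 0) - 1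
--
--     start = next((n for n in adj if net.get(n, 0) == 1), pairs[0][0])
--
--     # iterative Hierholzer with an explicit stack; edges are PREPENDED when a
--     # finished node is popped, so the result is already in path order (no final reverse)
--     result = []
--     stack = [start]
--     while stack:
--         top = stack[-1]
--         if adj.get(top):
--             stack.append(adj[top].pop())
--         else:
--             stack.pop()
--             if stack:
--                 result = [[stack[-1], top]] + result
--     return result
-- ===== Notes on version B (the rewrite author's own statement) =====
-- stated objective: alternative
-- what changed: Replaces A's recursive Hierholzer DFS and two degree dicts by staged passes (adjacency pass, then a single net-degree dict out-in) and an iterative explicit-stack traversal that prepends the edge [stack[-1], top] whenever a finished node is popped, so the result is built directly in path order with no final reverse and no recursion.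
import Mathlib
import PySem

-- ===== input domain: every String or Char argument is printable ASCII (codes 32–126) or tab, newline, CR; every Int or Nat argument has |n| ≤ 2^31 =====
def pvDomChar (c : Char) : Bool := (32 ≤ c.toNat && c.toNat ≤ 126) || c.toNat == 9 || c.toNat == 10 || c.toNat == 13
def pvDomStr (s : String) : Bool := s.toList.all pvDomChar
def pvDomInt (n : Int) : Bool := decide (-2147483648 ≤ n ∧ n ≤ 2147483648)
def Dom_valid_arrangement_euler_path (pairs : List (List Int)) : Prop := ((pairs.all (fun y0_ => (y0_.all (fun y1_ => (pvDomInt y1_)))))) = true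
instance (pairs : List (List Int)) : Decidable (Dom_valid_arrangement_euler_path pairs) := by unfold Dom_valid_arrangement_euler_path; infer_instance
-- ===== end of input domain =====

-- B replaces A's recursive Hierholzer DFS and two degree dicts by staged passes (adjacency,
-- then one net-degree dict) and an explicit-stack iteration that prepends each finished edge,
-- building the answer directly in path order (same values everywhere A returns; alternative).

-- ===== PORT A =====

-- number of remaining edges in an adjacency dict (fuel bound for the traversals)
def pvEdges (adj : PySem.Dict Int (List Int)) : Nat :=
  (adj.items.map (fun p => p.2.length)).sum

-- 'for src, dst in pairs: in_degree[dst] += 1; out_degree[src] += 1; adj_matrix[src].append(dst)'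
def pvBuildA (pairs : List (List Int)) :
    PySem.Dict Int Int × PySem.Dict Int Int × PySem.Dict Int (List Int) :=
  pairs.foldl
    (fun st p =>
      match p with
      | src :: dst :: _ =>
          (st.1.modify dst 0 (· + 1), st.2.1.modify src 0 (· + 1),
           st.2.2.modify src [] (· ++ [dst]))
      | _ => st)
    (PySem.Dict.empty, PySem.Dict.empty, PySem.Dict.empty)

-- recursive euler_path: while adj[curr]: nxt = adj[curr].pop(); recurse; path.append([curr, nxt])
-- fuel (pairs.length + 1 at the call site) only guards termination; it is never exhausted
def pvEulerA : Nat → PySem.Dict Int (List Int) → List (List Int) → Int →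
    PySem.Dict Int (List Int) × List (List Int)
  | 0, adj, path, _ => (adj, path)
  | f + 1, adj, path, curr =>
    match (adj.getD curr []).getLast? with
    | none => (adj, path)
    | some nxt =>
      let adj1 := adj.insert curr (adj.getD curr []).dropLast
      let r := pvEulerA f adj1 path nxt
      pvEulerA f r.1 (r.2 ++ [[curr, nxt]]) curr

def valid_arrangement_euler_path (pairs : List (List Int)) : List (List Int) :=
  let st := pvBuildA pairs
  let start :=
    match st.2.2.keys.find? (fun n => st.2.1.getD n 0 - st.1.getD n 0 == 1) with
    | some n => n
    | none => pairs.headI.headI   -- pairs[0][0]; junk on empty input (Python raises there, outside Pre_)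
  (pvEulerA (pairs.length + 1) st.2.2 [] start).2.reverse

-- ===== PORT B =====

-- pass 1: adj.setdefault(src, []).append(dst)
def pvAdjB (pairs : List (List Int)) : PySem.Dict Int (List Int) :=
  pairs.foldl
    (fun adj p =>
      match p with
      | src :: dst :: _ => adj.insert src (adj.getD src [] ++ [dst])
      | _ => adj)
    PySem.Dict.empty

-- pass 2: net[src] = net.get(src,0)+1; net[dst] = net.get(dst,0)-1
def pvNetB (pairs : List (List Int)) : PySem.Dict Int Int :=
  pairs.foldl
    (fun net p =>
      match p with
      | src :: dst :: _ =>
          let n1 := net.insert src (net.getD src 0 + 1)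
          n1.insert dst (n1.getD dst 0 - 1)
      | _ => net)
    PySem.Dict.empty

-- while stack: top = stack[-1]; if adj.get(top): stack.append(adj[top].pop())
--              else: stack.pop(); if stack: result = [[stack[-1], top]] + result
-- (stack modelled as top + rest; fuel 2*edges+1 is exactly the number of iterations)
def pvLoopB : Nat → PySem.Dict Int (List Int) → Int → List Int → List (List Int) → List (List Int)
  | 0, _, _, _, result => result
  | f + 1, adj, top, rest, result =>
    match (adj.getD top []).getLast? with
    | some nxt => pvLoopB f (adj.insert top (adj.getD top []).dropLast) nxt (top :: rest) result
    | none =>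
      match rest with
      | [] => result
      | r0 :: rs => pvLoopB f adj r0 rs ([r0, top] :: result)

def valid_arrangement_euler_path_alt (pairs : List (List Int)) : List (List Int) :=
  let adj := pvAdjB pairs
  let start :=
    match adj.keys.find? (fun n => (pvNetB pairs).getD n 0 == 1) with
    | some n => n
    | none => pairs.headI.headI
  pvLoopB (2 * pvEdges adj + 1) adj start [] []

-- ===== PRECONDITION & SPEC =====
-- Pre_ excludes exactly the inputs where Python A raises: an empty list (IndexError on
-- pairs[0][0]) and rows that are not length-2 (ValueError unpacking 'src, dst').
def Pre_valid_arrangement_euler_path (pairs : List (List Int)) : Prop :=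
  pairs ≠ [] ∧ ∀ p ∈ pairs, p.length = 2
instance (pairs : List (List Int)) : Decidable (Pre_valid_arrangement_euler_path pairs) := by
  unfold Pre_valid_arrangement_euler_path; infer_instance

def pvWitness_valid_arrangement_euler_path : List (List Int) := [[1, 2], [2, 1]]

def Spec_valid_arrangement_euler_path (pairs : List (List Int)) (out : List (List Int)) : Prop :=
  out = valid_arrangement_euler_path_alt pairs
instance (pairs : List (List Int)) (out : List (List Int)) :
    Decidable (Spec_valid_arrangement_euler_path pairs out) := by
  unfold Spec_valid_arrangement_euler_path; infer_instance

-- ===== CLAIM (what is proved, stated in full; the proofs are below) =====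
def Claim_equal_valid_arrangement_euler_path : Prop :=
  ∀ (pairs : List (List Int)), Dom_valid_arrangement_euler_path pairs →
    Pre_valid_arrangement_euler_path pairs →
    Spec_valid_arrangement_euler_path pairs (valid_arrangement_euler_path pairs)

-- ===== LEMMAS AND PROOFS =====

-- B's staged adjacency pass builds exactly the third component of A's triple fold
theorem pvAdj_eq (pairs : List (List Int)) : (pvBuildA pairs).2.2 = pvAdjB pairs := by
  have aux : ∀ (ps : List (List Int))
      (st : PySem.Dict Int Int × PySem.Dict Int Int × PySem.Dict Int (List Int)),
      (ps.foldl
        (fun st p =>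
          match p with
          | src :: dst :: _ =>
              (st.1.modify dst 0 (· + 1), st.2.1.modify src 0 (· + 1),
               st.2.2.modify src [] (· ++ [dst]))
          | _ => st) st).2.2
        = ps.foldl
            (fun adj p =>
              match p with
              | src :: dst :: _ => adj.insert src (adj.getD src [] ++ [dst])
              | _ => adj) st.2.2 := by
    intro ps
    induction ps with
    | nil => intro st; rfl
    | cons p ps ih =>
      intro st
      rcases p with _ | ⟨src, _ | ⟨dst, r⟩⟩ <;> simp only [List.foldl_cons] <;>
        exact ih _
  exact aux pairs _

-- out_degree - in_degree agrees pointwise with B's single net dict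
theorem pvNet_eq (pairs : List (List Int)) (n : Int) :
    (pvBuildA pairs).2.1.getD n 0 - (pvBuildA pairs).1.getD n 0
      = (pvNetB pairs).getD n 0 := by
  have aux : ∀ (ps : List (List Int))
      (st : PySem.Dict Int Int × PySem.Dict Int Int × PySem.Dict Int (List Int))
      (net : PySem.Dict Int Int),
      (∀ m, st.2.1.getD m 0 - st.1.getD m 0 = net.getD m 0) →
      ∀ m,
      (ps.foldl
        (fun st p =>
          match p with
          | src :: dst :: _ =>
              (st.1.modify dst 0 (· + 1), st.2.1.modify src 0 (· + 1),
               st.2.2.modify src [] (· ++ [dst]))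
          | _ => st) st).2.1.getD m 0
      - (ps.foldl
          (fun st p =>
            match p with
            | src :: dst :: _ =>
                (st.1.modify dst 0 (· + 1), st.2.1.modify src 0 (· + 1),
                 st.2.2.modify src [] (· ++ [dst]))
            | _ => st) st).1.getD m 0
      = (ps.foldl
          (fun net p =>
            match p with
            | src :: dst :: _ =>
                let n1 := net.insert src (net.getD src 0 + 1)
                n1.insert dst (n1.getD dst 0 - 1)
            | _ => net) net).getD m 0 := by
    intro ps
    induction ps with
    | nil => intro st net h m; exact h m
    | cons p ps ih =>
      intro st net h m
      rcases p with _ | ⟨src, _ | ⟨dst, r⟩⟩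
      · exact ih st net h m
      · exact ih st net h m
      · simp only [List.foldl_cons]
        refine ih _ _ ?_ m
        intro k
        have hin : (st.1.modify dst 0 (· + 1)).getD k 0
            = if k = dst then st.1.getD dst 0 + 1 else st.1.getD k 0 :=
          PySem.Dict.getD_modify _ _ _ _ _
        have hout : (st.2.1.modify src 0 (· + 1)).getD k 0
            = if k = src then st.2.1.getD src 0 + 1 else st.2.1.getD k 0 :=
          PySem.Dict.getD_modify _ _ _ _ _
        have hnet1 : ∀ j, (net.insert src (net.getD src 0 + 1)).getD j 0
            = if j = src then net.getD src 0 + 1 else net.getD j 0 := fun j =>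
          PySem.Dict.getD_insert _ _ _ _ _
        have hnet2 : ((net.insert src (net.getD src 0 + 1)).insert dst
              ((net.insert src (net.getD src 0 + 1)).getD dst 0 - 1)).getD k 0
            = if k = dst then (net.insert src (net.getD src 0 + 1)).getD dst 0 - 1
              else (net.insert src (net.getD src 0 + 1)).getD k 0 :=
          PySem.Dict.getD_insert _ _ _ _ _
        dsimp only
        rw [hin, hout, hnet2, hnet1, hnet1]
        have hs := h src
        have hd := h dst
        have hk := h k
        by_cases h1 : k = dst <;> by_cases h2 : k = src <;> by_cases h3 : dst = src <;>
          simp [h1, h2, h3] <;> omega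
  exact aux pairs _ PySem.Dict.empty (fun m => rfl) n

theorem pvLoopB_pop (f : Nat) (adj : PySem.Dict Int (List Int)) (top : Int) (rest : List Int)
    (result : List (List Int)) (h : (adj.getD top []).getLast? = none) :
    pvLoopB (f + 1) adj top rest result =
      match rest with
      | [] => result
      | r0 :: rs => pvLoopB f adj r0 rs ([r0, top] :: result) := by
  simp only [pvLoopB]; rw [h]

theorem pvLoopB_push (f : Nat) (adj : PySem.Dict Int (List Int)) (top : Int) (rest : List Int)
    (result : List (List Int)) (nxt : Int) (h : (adj.getD top []).getLast? = some nxt) :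
    pvLoopB (f + 1) adj top rest result =
      pvLoopB f (adj.insert top (adj.getD top []).dropLast) nxt (top :: rest) result := by
  simp only [pvLoopB]; rw [h]

-- replacing the (unique, by Nodup) value at key k changes the edge sum by the length difference
theorem pvSum_replace (xs : List (Int × List Int)) (k : Int) (l v : List Int)
    (hnd : (xs.map Prod.fst).Nodup) (hm : (k, l) ∈ xs) :
    ((xs.map (fun p => if p.1 == k then (k, v) else p)).map (fun p => p.2.length)).sum + l.length
      = (xs.map (fun p => p.2.length)).sum + v.length := by
  induction xs with
  | nil => cases hm
  | cons x xs ih =>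
    simp only [List.map_cons, List.nodup_cons] at hnd
    rcases List.mem_cons.mp hm with h | h
    · subst h
      have hk : ∀ p ∈ xs, (if p.1 == k then ((k, v) : Int × List Int) else p) = p := by
        intro p hp
        have hne : p.1 ≠ k := by
          intro he; exact hnd.1 (he ▸ List.mem_map.mpr ⟨p, hp, rfl⟩)
        simp [hne]
      simp only [List.map_cons, List.sum_cons, beq_self_eq_true, if_true,
        List.map_congr_left hk, List.map_id_fun', id]
      omega
    · have hne : x.1 ≠ k := by
        intro he
        exact hnd.1 (he ▸ (List.mem_map.mpr ⟨(k, l), h, rfl⟩ : (k, l).1 ∈ xs.map Prod.fst))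
      have := ih hnd.2 h
      simp only [List.map_cons, List.sum_cons, show (x.1 == k) = false by simp [hne],
        Bool.false_eq_true, if_false]
      omega

theorem pvEdges_insert (adj : PySem.Dict Int (List Int)) (k : Int) (v : List Int)
    (hnd : adj.keys.Nodup) :
    pvEdges (adj.insert k v) + (adj.getD k []).length = pvEdges adj + v.length := by
  unfold pvEdges
  by_cases hc : adj.contains k
  · have hs : (adj.get? k).isSome := by rw [← PySem.Dict.contains_eq_isSome_get?, hc]
    obtain ⟨l, hl⟩ := Option.isSome_iff_exists.mp hs
    have hm : (k, l) ∈ adj.items := PySem.Dict.mem_items_of_get?_eq_some _ hl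
    have hgd : adj.getD k [] = l := PySem.Dict.getD_of_get?_eq_some _ _ hl
    rw [PySem.Dict.items_insert_of_contains _ _ hc, hgd]
    have hnd' : (adj.items.map Prod.fst).Nodup := by
      simpa [PySem.Dict.keys] using hnd
    exact pvSum_replace adj.items k l v hnd' hm
  · rw [PySem.Dict.getD_of_not_contains _ _ (Bool.eq_false_iff.mpr hc),
        PySem.Dict.items_insert_of_not_contains _ _ (Bool.eq_false_iff.mpr hc)]
    simp

-- when no edges remain, every adjacency list is empty
theorem pvGetD_eq_nil_of_edges_zero (adj : PySem.Dict Int (List Int)) (k : Int)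
    (h : pvEdges adj = 0) : adj.getD k [] = [] := by
  rw [PySem.Dict.getD_eq_get?_getD]
  cases hg : adj.get? k with
  | none => rfl
  | some v =>
    have hm : (k, v) ∈ adj.items := PySem.Dict.mem_items_of_get?_eq_some _ hg
    have : v.length = 0 := by
      have := List.sum_eq_zero_iff.mp h
      exact this _ (List.mem_map.mpr ⟨(k, v), hm, rfl⟩)
    simp [List.length_eq_zero_iff.mp this]

-- the recursion never duplicates keys and never adds edges
theorem pvEulerA_inv (f : Nat) (adj : PySem.Dict Int (List Int)) (path : List (List Int))
    (c : Int) (hnd : adj.keys.Nodup) :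
    (pvEulerA f adj path c).1.keys.Nodup ∧ pvEdges (pvEulerA f adj path c).1 ≤ pvEdges adj := by
  induction f generalizing adj path c with
  | zero => exact ⟨hnd, le_refl _⟩
  | succ f ih =>
    simp only [pvEulerA]
    cases hL : (adj.getD c []).getLast? with
    | none => exact ⟨hnd, le_refl _⟩
    | some nxt =>
      dsimp only
      have hne : adj.getD c [] ≠ [] := by intro h; rw [h] at hL; cases hL
      have hnd1 : (adj.insert c (adj.getD c []).dropLast).keys.Nodup :=
        PySem.Dict.nodup_keys_insert _ _ _ hnd
      have he1 := pvEdges_insert adj c (adj.getD c []).dropLast hnd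
      have hlen : (adj.getD c []).dropLast.length + 1 = (adj.getD c []).length := by
        have := List.length_pos_of_ne_nil hne
        simp [List.length_dropLast]; omega
      have h1 := ih (adj.insert c (adj.getD c []).dropLast) path nxt hnd1
      have h2 := ih (pvEulerA f (adj.insert c (adj.getD c []).dropLast) path nxt).1
        ((pvEulerA f (adj.insert c (adj.getD c []).dropLast) path nxt).2 ++ [[c, nxt]]) c h1.1
      exact ⟨h2.1, by omega⟩

-- the path accumulator is only appended to
theorem pvEulerA_path (f : Nat) (adj : PySem.Dict Int (List Int)) (path : List (List Int))
    (c : Int) :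
    pvEulerA f adj path c = ((pvEulerA f adj [] c).1, path ++ (pvEulerA f adj [] c).2) := by
  induction f generalizing adj path c with
  | zero => simp [pvEulerA]
  | succ f ih =>
    simp only [pvEulerA]
    cases hL : (adj.getD c []).getLast? with
    | none => simp
    | some nxt =>
      dsimp only
      rw [ih (adj.insert c (adj.getD c []).dropLast) path nxt,
          ih (adj.insert c (adj.getD c []).dropLast) [] nxt]
      rw [ih _ (path ++ _ ++ [[c, nxt]]) c, ih _ ([] ++ _ ++ [[c, nxt]]) c]
      simp

theorem pvEulerA_none (g : Nat) (adj : PySem.Dict Int (List Int)) (path : List (List Int))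
    (curr : Int) (h : (adj.getD curr []).getLast? = none) :
    pvEulerA (g + 1) adj path curr = (adj, path) := by
  simp only [pvEulerA]; rw [h]

theorem pvEulerA_step (g : Nat) (adj : PySem.Dict Int (List Int)) (path : List (List Int))
    (curr nxt : Int) (h : (adj.getD curr []).getLast? = some nxt) :
    pvEulerA (g + 1) adj path curr
      = pvEulerA g (pvEulerA g (adj.insert curr (adj.getD curr []).dropLast) path nxt).1
          ((pvEulerA g (adj.insert curr (adj.getD curr []).dropLast) path nxt).2 ++ [[curr, nxt]])
          curr := by
  simp only [pvEulerA]; rw [h]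

-- MAIN INVARIANT: the stack loop run with top curr over 'rest' first prepends, in path order,
-- exactly the edges A's recursion appends while finishing curr, then pops curr
theorem pvMain (f : Nat) :
    ∀ (adj : PySem.Dict Int (List Int)) (curr : Int) (rest : List Int)
      (result : List (List Int)), adj.keys.Nodup → pvEdges adj ≤ f →
    pvLoopB (2 * pvEdges adj + (rest.length + 1)) adj curr rest result =
      (match rest with
       | [] => (pvEulerA (f + 1) adj [] curr).2.reverse ++ result
       | r0 :: rs =>
         pvLoopB (2 * pvEdges (pvEulerA (f + 1) adj [] curr).1 + (rs.length + 1))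
           (pvEulerA (f + 1) adj [] curr).1 r0 rs
           ([r0, curr] :: (pvEulerA (f + 1) adj [] curr).2.reverse ++ result)) := by
  induction f with
  | zero =>
    intro adj curr rest result hnd he
    have hz : pvEdges adj = 0 := Nat.le_zero.mp he
    have hg : adj.getD curr [] = [] := pvGetD_eq_nil_of_edges_zero adj curr hz
    have hE : pvEulerA 1 adj [] curr = (adj, []) := by simp [pvEulerA, hg]
    rw [show 2 * pvEdges adj + (rest.length + 1) = rest.length + 1 by omega]
    rw [pvLoopB_pop rest.length adj curr rest result (by rw [hg]; rfl)]
    cases rest with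
    | nil => rw [hE]; simp
    | cons r0 rs =>
      rw [hE]
      dsimp only
      rw [hz]
      simp
  | succ f ih =>
    intro adj curr rest result hnd he
    cases hL : (adj.getD curr []).getLast? with
    | none =>
      have hE : pvEulerA (f + 1 + 1) adj [] curr = (adj, []) :=
        pvEulerA_none (f + 1) adj [] curr hL
      rw [show 2 * pvEdges adj + (rest.length + 1)
            = (2 * pvEdges adj + rest.length) + 1 by omega]
      rw [pvLoopB_pop _ adj curr rest result hL]
      cases rest with
      | nil => rw [hE]; simp
      | cons r0 rs =>
        rw [hE]
        simp
    | some nxt =>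
      have hne : adj.getD curr [] ≠ [] := by intro h; rw [h] at hL; cases hL
      have hnd1 : (adj.insert curr (adj.getD curr []).dropLast).keys.Nodup :=
        PySem.Dict.nodup_keys_insert _ _ _ hnd
      have he1 : pvEdges (adj.insert curr (adj.getD curr []).dropLast) + 1 = pvEdges adj := by
        have h1 := pvEdges_insert adj curr (adj.getD curr []).dropLast hnd
        have h2 : (adj.getD curr []).dropLast.length + 1 = (adj.getD curr []).length := by
          have := List.length_pos_of_ne_nil hne
          simp [List.length_dropLast]; omega
        omega
      have hinv := pvEulerA_inv (f + 1) (adj.insert curr (adj.getD curr []).dropLast) [] nxt hnd1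
      rw [show 2 * pvEdges adj + (rest.length + 1)
            = (2 * pvEdges (adj.insert curr (adj.getD curr []).dropLast)
               + ((curr :: rest).length + 1)) + 1 by simp only [List.length_cons]; omega]
      rw [pvLoopB_push _ adj curr rest result nxt hL]
      rw [ih (adj.insert curr (adj.getD curr []).dropLast) nxt (curr :: rest) result hnd1
            (by omega)]
      dsimp only
      rw [ih (pvEulerA (f + 1) (adj.insert curr (adj.getD curr []).dropLast) [] nxt).1 curr rest
            ([curr, nxt]
              :: (pvEulerA (f + 1) (adj.insert curr (adj.getD curr []).dropLast) [] nxt).2.reverse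
              ++ result) hinv.1 (by omega)]
      have hRHS : pvEulerA (f + 1 + 1) adj [] curr
          = ((pvEulerA (f + 1)
                (pvEulerA (f + 1) (adj.insert curr (adj.getD curr []).dropLast) [] nxt).1 [] curr).1,
             (pvEulerA (f + 1) (adj.insert curr (adj.getD curr []).dropLast) [] nxt).2
               ++ [[curr, nxt]]
               ++ (pvEulerA (f + 1)
                     (pvEulerA (f + 1) (adj.insert curr (adj.getD curr []).dropLast) [] nxt).1
                     [] curr).2) := by
        rw [pvEulerA_step (f + 1) adj [] curr nxt hL]
        rw [pvEulerA_path (f + 1)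
              (pvEulerA (f + 1) (adj.insert curr (adj.getD curr []).dropLast) [] nxt).1
              ((pvEulerA (f + 1) (adj.insert curr (adj.getD curr []).dropLast) [] nxt).2
                ++ [[curr, nxt]]) curr]
      rw [hRHS]
      cases rest with
      | nil => simp
      | cons r0 rs => simp

-- build facts: keys stay unique, and there are at most pairs.length edges
theorem pvBuild_inv (pairs : List (List Int)) :
    (pvBuildA pairs).2.2.keys.Nodup ∧ pvEdges (pvBuildA pairs).2.2 ≤ pairs.length := by
  have aux : ∀ (ps : List (List Int))
      (st : PySem.Dict Int Int × PySem.Dict Int Int × PySem.Dict Int (List Int)),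
      st.2.2.keys.Nodup →
      (ps.foldl
        (fun st p =>
          match p with
          | src :: dst :: _ =>
              (st.1.modify dst 0 (· + 1), st.2.1.modify src 0 (· + 1),
               st.2.2.modify src [] (· ++ [dst]))
          | _ => st) st).2.2.keys.Nodup ∧
      pvEdges (ps.foldl
        (fun st p =>
          match p with
          | src :: dst :: _ =>
              (st.1.modify dst 0 (· + 1), st.2.1.modify src 0 (· + 1),
               st.2.2.modify src [] (· ++ [dst]))
          | _ => st) st).2.2 ≤ pvEdges st.2.2 + ps.length := by
    intro ps
    induction ps with
    | nil => intro st h; exact ⟨h, by simp⟩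
    | cons p ps ih =>
      intro st h
      rcases p with _ | ⟨src, _ | ⟨dst, r⟩⟩
      · simpa using (fun h' => ⟨(ih st h').1, by have := (ih st h').2; omega⟩) h
      · simpa using (fun h' => ⟨(ih st h').1, by have := (ih st h').2; omega⟩) h
      · simp only [List.foldl_cons]
        have hstep : st.2.2.modify src [] (· ++ [dst])
            = st.2.2.insert src (st.2.2.getD src [] ++ [dst]) := rfl
        have hnd1 : (st.2.2.modify src [] (· ++ [dst])).keys.Nodup := by
          rw [hstep]; exact PySem.Dict.nodup_keys_insert _ _ _ h
        have he : pvEdges (st.2.2.modify src [] (· ++ [dst]))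
            = pvEdges st.2.2 + 1 := by
          rw [hstep]
          have := pvEdges_insert st.2.2 src (st.2.2.getD src [] ++ [dst]) h
          simp at this; omega
        have := ih (st.1.modify dst 0 (· + 1), st.2.1.modify src 0 (· + 1),
          st.2.2.modify src [] (· ++ [dst])) hnd1
        exact ⟨this.1, by rw [he] at this; simp only [List.length_cons]; omega⟩
  have h0 : (PySem.Dict.empty : PySem.Dict Int (List Int)).keys.Nodup :=
    PySem.Dict.nodup_keys_empty
  have := aux pairs (PySem.Dict.empty, PySem.Dict.empty, PySem.Dict.empty) h0
  refine ⟨this.1, ?_⟩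
  have h2 := this.2
  have hz : pvEdges (PySem.Dict.empty : PySem.Dict Int (List Int)) = 0 := rfl
  rw [hz] at h2
  simpa [pvBuildA] using h2

-- B's stack loop from a single start produces A's record reversed
theorem pvResult_eq (adj : PySem.Dict Int (List Int)) (start : Int) (n : Nat)
    (hnd : adj.keys.Nodup) (hb : pvEdges adj ≤ n) :
    pvLoopB (2 * pvEdges adj + 1) adj start [] [] = (pvEulerA (n + 1) adj [] start).2.reverse := by
  have h := pvMain n adj start [] [] hnd hb
  simpa using h

-- ===== VERDICT (by name: the statement is the Claim_ definition above) =====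
theorem valid_arrangement_euler_path_spec : Claim_equal_valid_arrangement_euler_path := by
  intro pairs _ _
  unfold Spec_valid_arrangement_euler_path
  unfold valid_arrangement_euler_path valid_arrangement_euler_path_alt
  obtain ⟨hnd, hb⟩ := pvBuild_inv pairs
  have hpred : (fun n => (pvBuildA pairs).2.1.getD n 0 - (pvBuildA pairs).1.getD n 0 == 1)
      = (fun n => (pvNetB pairs).getD n 0 == 1) := by
    funext n; rw [pvNet_eq]
  dsimp only
  rw [← pvAdj_eq, hpred]
  rw [pvResult_eq (pvBuildA pairs).2.2 _ pairs.length hnd hb]
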